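-- pv_equiv track=rewrite | github.com/makhidkarun/traveller_pyroute | PyRoute/AreaItems/Galaxy.py | route_no_revisit
-- ===== SOURCE A (Python) =====
-- def route_no_revisit(route):
--     visited = set()
--
--     for item in route:
--         name = str(item)
--         if name in visited:
--             return False
--         visited.add(name)
--
--     return True
-- ===== SOURCE B (Python) =====
-- def route_no_revisit(route):
--     names = sorted(str(item) for item in route)
--     for a, b in zip(names, names[1:]):
--         if a == b:
--             return False
--     return True
-- ===== Notes on version B (the rewrite author's own statement) =====
-- stated objective: alternative
-- what changed: Replaces incremental hash-set membership testing with sort-then-adjacent-scan duplicate detection: build the sorted list of names once, then return False on the first pair of equal neighbours.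
import Mathlib
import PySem

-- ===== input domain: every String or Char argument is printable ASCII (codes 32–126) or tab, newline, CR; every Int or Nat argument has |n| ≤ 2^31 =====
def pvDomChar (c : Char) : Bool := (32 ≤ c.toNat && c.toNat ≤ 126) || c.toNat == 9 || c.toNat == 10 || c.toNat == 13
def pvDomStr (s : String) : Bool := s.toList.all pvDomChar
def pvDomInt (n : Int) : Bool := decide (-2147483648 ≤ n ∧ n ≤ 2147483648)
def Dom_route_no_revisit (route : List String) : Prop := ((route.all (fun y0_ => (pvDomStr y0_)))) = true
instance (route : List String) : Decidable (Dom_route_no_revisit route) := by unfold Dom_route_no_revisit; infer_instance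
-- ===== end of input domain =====

-- B replaces A's incremental set-membership loop by sort-then-adjacent-scan duplicate detection (alternative algorithm, same return value).

-- ===== PORT A =====
-- the 'for item in route' loop carrying the 'visited' set; str(item) is the identity on strings
def rnrLoop (visited : PySem.Set String) : List String → Bool
  | [] => true
  | item :: rest =>
    let name := item
    if PySem.Set.contains visited name then false
    else rnrLoop (PySem.Set.add visited name) rest

def route_no_revisit (route : List String) : Bool :=
  rnrLoop PySem.Set.empty route

-- ===== PORT B =====
-- the 'for a, b in zip(names, names[1:])' loop: compare adjacent entries
def rnrAdjScan : List String → Bool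
  | a :: b :: rest => if a == b then false else rnrAdjScan (b :: rest)
  | _ => true

def route_no_revisit_alt (route : List String) : Bool :=
  rnrAdjScan (PySem.List.sorted (route.map (fun item => item)) (fun x => x) false)

-- ===== PRECONDITION & SPEC =====
def Spec_route_no_revisit (route : List String) (out : Bool) : Prop := out = route_no_revisit_alt route
instance (route : List String) (out : Bool) : Decidable (Spec_route_no_revisit route out) := by unfold Spec_route_no_revisit; infer_instance

-- ===== CLAIM (what is proved, stated in full; the proofs are below) =====
def Claim_equal_route_no_revisit : Prop := ∀ (route : List String), Dom_route_no_revisit route → Spec_route_no_revisit route (route_no_revisit route)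

-- ===== LEMMAS AND PROOFS =====

-- A's loop succeeds iff the remaining items are pairwise distinct and none was already visited
theorem rnrLoop_eq_true_iff (xs : List String) : ∀ (s : PySem.Set String),
    (rnrLoop s xs = true ↔ xs.Nodup ∧ ∀ x ∈ xs, x ∉ s) := by
  induction xs with
  | nil => intro s; simp [rnrLoop]
  | cons a rest ih =>
    intro s
    simp only [rnrLoop]
    by_cases h : a ∈ s
    · rw [if_pos ((PySem.Set.contains_iff s a).2 h)]
      constructor
      · intro hx; exact absurd hx (by simp)
      · rintro ⟨hnd, hall⟩; exact absurd h (hall a (by simp))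
    · have hc : ¬ (PySem.Set.contains s a = true) := fun hx => h ((PySem.Set.contains_iff s a).1 hx)
      rw [if_neg hc, ih (PySem.Set.add s a)]
      constructor
      · rintro ⟨hnd, hall⟩
        refine ⟨List.nodup_cons.2 ⟨fun hmem => ?_, hnd⟩, ?_⟩
        · exact (hall a hmem) ((PySem.Set.mem_add s a a).2 (Or.inr rfl))
        · intro x hx
          rcases List.mem_cons.1 hx with rfl | hx
          · exact h
          · intro hxs
            exact (hall x hx) ((PySem.Set.mem_add s a x).2 (Or.inl hxs))
      · rintro ⟨hnd, hall⟩
        have hnd' := List.nodup_cons.1 hnd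
        refine ⟨hnd'.2, fun x hx hmem => ?_⟩
        rcases (PySem.Set.mem_add s a x).1 hmem with hm | hm
        · exact (hall x (List.mem_cons.2 (Or.inr hx))) hm
        · exact hnd'.1 (hm ▸ hx)

-- on a ≤-sorted list, the adjacent scan succeeds iff it is strictly increasing
theorem rnrAdjScan_eq_true_iff (l : List String) (hs : l.Pairwise (· ≤ ·)) :
    (rnrAdjScan l = true ↔ l.Pairwise (· < ·)) := by
  induction l with
  | nil => simp [rnrAdjScan]
  | cons a t ih =>
    cases t with
    | nil => simp [rnrAdjScan]
    | cons b rest =>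
      have hs' : (b :: rest).Pairwise (· ≤ ·) := (List.pairwise_cons.1 hs).2
      have hab : a ≤ b := (List.pairwise_cons.1 hs).1 b (by simp)
      have hble : ∀ y ∈ rest, b ≤ y := fun y hy => (List.pairwise_cons.1 hs').1 y hy
      simp only [rnrAdjScan]
      by_cases hcase : a = b
      · subst hcase
        simp only [beq_self_eq_true, if_true]
        constructor
        · intro h; exact absurd h (by simp)
        · intro h
          exact absurd (lt_irrefl a) (by simpa using (List.pairwise_cons.1 h).1 a (by simp))
      · rw [if_neg (by simpa using hcase)]
        rw [ih hs']
        constructor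
        · intro h
          refine List.pairwise_cons.2 ⟨?_, h⟩
          intro y hy
          rcases List.mem_cons.1 hy with rfl | hy
          · exact lt_of_le_of_ne hab hcase
          · exact lt_of_lt_of_le (lt_of_le_of_ne hab hcase) (hble y hy)
        · intro h; exact (List.pairwise_cons.1 h).2

-- B succeeds iff the route's names are pairwise distinct
theorem alt_eq_true_iff (route : List String) :
    (route_no_revisit_alt route = true ↔ route.Nodup) := by
  unfold route_no_revisit_alt
  have hperm : (PySem.List.sorted (route.map (fun item => item)) (fun x => x) false).Perm route := by
    simpa using (PySem.List.sorted_perm (route.map (fun item => item)) (fun x : String => x) false)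
  have hs : (PySem.List.sorted (route.map (fun item => item)) (fun x => x) false).Pairwise
      (fun a b => (fun x : String => x) a ≤ (fun x : String => x) b) :=
    PySem.List.sorted_pairwise _ _
  rw [rnrAdjScan_eq_true_iff _ (by simpa using hs)]
  constructor
  · intro h
    exact hperm.nodup_iff.1 (h.imp (fun {a b} hab => ne_of_lt hab))
  · intro h
    have hnd := hperm.nodup_iff.2 h
    have hle : (PySem.List.sorted (route.map (fun item => item)) (fun x => x) false).Pairwise (· ≤ ·) := by simpa using hs
    exact (List.Pairwise.and hle hnd).imp (fun hab => lt_of_le_of_ne hab.1 hab.2)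

-- A succeeds iff the route's names are pairwise distinct
theorem a_eq_true_iff (route : List String) :
    (route_no_revisit route = true ↔ route.Nodup) := by
  unfold route_no_revisit
  rw [rnrLoop_eq_true_iff]
  simp [PySem.Set.empty]

-- ===== VERDICT (by name: the statement is the Claim_ definition above) =====
theorem route_no_revisit_spec : Claim_equal_route_no_revisit := by
  intro route _
  unfold Spec_route_no_revisit
  rw [Bool.eq_iff_iff, a_eq_true_iff, alt_eq_true_iff]
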